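-- pv_equiv track=rewrite | github.com/NguyenTuKien/D23CT01_Python | Practice02/09.Xep nhom.py | max_group
-- ===== SOURCE A (Python) =====
-- from bisect import bisect_left
--
-- def max_group(a, k):
--     a.sort()
--     n = len(a)
--     s = 0
--     prefix = [0] * (n + 1)
--     for i, x in enumerate(a, 1):
--         s += x
--         prefix[i] = s
--     hi = s // k
--     lo = 0
--     while lo < hi:
--         mid = (lo + hi + 1) // 2
--         pos = bisect_left(a, mid)
--         total = prefix[pos] + mid * (n - pos)
--         if total >= mid * k:
--             lo = mid
--         else:
--             hi = mid - 1
--     return lo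
-- ===== SOURCE B (Python) =====
-- def max_group(a, k):
--     # A sorts `a` in place; keep that side effect (equivalence is about the return value).
--     a.sort()
--     lo = 0
--     cap = sum(a) // k
--     w = cap if cap > 0 else 0        # remaining search width above lo
--     while w > 0:
--         d = (w + 1) // 2
--         v = lo + d
--         # shareable total at level v, directly from the elements (no prefix array, no bisect)
--         if sum(x if x < v else v for x in a) >= v * k:
--             lo, w = v, w - d
--         else:
--             w = d - 1
--     return lo
-- ===== Notes on version B (the rewrite author's own statement) =====
-- stated objective: simpler
-- what changed: B drops A's prefix-sum array and bisect_left entirely: each probe's total is a direct one-pass sum of min(x, v) over the elements, and the halving is re-decomposed over (lo, remaining width) with a nonnegative width instead of A's (lo, hi) pair, so the whole function is one short loop with no auxiliary table.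
import Mathlib
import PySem

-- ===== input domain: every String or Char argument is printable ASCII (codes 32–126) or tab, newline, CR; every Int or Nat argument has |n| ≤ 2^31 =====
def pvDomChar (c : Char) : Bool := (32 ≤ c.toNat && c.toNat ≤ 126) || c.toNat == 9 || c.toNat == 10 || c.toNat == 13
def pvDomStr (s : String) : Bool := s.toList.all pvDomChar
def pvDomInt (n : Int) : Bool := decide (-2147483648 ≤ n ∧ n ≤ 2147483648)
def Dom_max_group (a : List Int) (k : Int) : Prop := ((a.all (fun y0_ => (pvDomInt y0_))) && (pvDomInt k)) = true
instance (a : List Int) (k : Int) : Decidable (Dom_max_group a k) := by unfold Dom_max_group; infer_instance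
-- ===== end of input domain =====

-- B drops A's prefix-sum array and bisect_left (each probe sums min(x,v) directly) and re-decomposes the
-- halving over (lo, remaining width) — objective: simpler, not faster. A sorts `a` in place (B's Python
-- does the same); the equivalence proved here is about the RETURN value.

-- ===== PORT A =====
-- while lo < hi: mid = (lo+hi+1)//2; pos = bisect_left(a, mid); total = prefix[pos] + mid*(n-pos); …
def maxGroupLoopA (sa pfx : List Int) (n : Nat) (k : Int) (lo hi : Int) : Int :=
  if h : lo < hi then
    let mid := PySem.Int.floordiv (lo + hi + 1) 2
    let pos := PySem.List.bisectLeft sa mid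
    -- prefix[pos]: pos = bisect_left is always in range (0 ≤ pos ≤ n), so plain-index getD is exact
    let total := pfx.getD pos 0 + mid * ((n : Int) - (pos : Int))
    if total ≥ mid * k then maxGroupLoopA sa pfx n k mid hi
    else maxGroupLoopA sa pfx n k lo (mid - 1)
  else lo
termination_by (hi - lo).toNat
decreasing_by
  · have := PySem.Int.floordiv_two_mid_bounds (lo := lo + 1) (hi := hi) (by omega)
    have h2 : lo + 1 + hi = lo + hi + 1 := by ring
    rw [h2] at this
    omega
  · have := PySem.Int.floordiv_two_mid_bounds (lo := lo + 1) (hi := hi) (by omega)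
    have h2 : lo + 1 + hi = lo + hi + 1 := by ring
    rw [h2] at this
    omega

def max_group (a : List Int) (k : Int) : Int :=
  let sa := PySem.List.sorted a (fun x => x)          -- a.sort() (in place; `a` means sa below)
  let n := sa.length
  -- s = 0; prefix = [0]*(n+1); for i, x in enumerate(a, 1): s += x; prefix[i] = s
  let sp := sa.foldl (fun (p : Int × List Int) x => (p.1 + x, p.2 ++ [p.1 + x])) (0, [0])
  let hi := PySem.Int.floordiv sp.1 k                 -- s // k
  maxGroupLoopA sa sp.2 n k 0 hi

-- ===== PORT B =====
-- sum(x if x < v else v for x in a)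
def reachSum (a : List Int) (v : Int) : Int :=
  (a.map (fun x => if x < v then x else v)).sum

-- while w > 0: d = (w+1)//2; v = lo+d; if reachable: lo, w = v, w-d else w = d-1
-- (the nonnegative remaining width w is a Nat; Python's `w` is the same nonnegative int)
def maxGroupGo (a : List Int) (k : Int) (lo : Int) (w : Nat) : Int :=
  match w with
  | 0 => lo
  | Nat.succ w' =>
    let d := (w' + 2) / 2
    let v := lo + (d : Int)
    if reachSum a v ≥ v * k then maxGroupGo a k v (w' + 1 - d)
    else maxGroupGo a k lo (d - 1)
termination_by w
decreasing_by all_goals omega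

def max_group_alt (a : List Int) (k : Int) : Int :=
  let sa := PySem.List.sorted a (fun x => x)          -- a.sort() (kept for the in-place mutation)
  let cap := PySem.Int.floordiv sa.sum k              -- sum(a) // k
  maxGroupGo sa k 0 (if 0 < cap then cap.toNat else 0)

-- ===== PRECONDITION & SPEC =====
-- Pre_ excludes only k = 0, on which Python A raises ZeroDivisionError at `s // k`.
def Pre_max_group (a : List Int) (k : Int) : Prop := k ≠ 0
instance (a : List Int) (k : Int) : Decidable (Pre_max_group a k) := by unfold Pre_max_group; infer_instance
def pvWitness_max_group : List Int × Int := ([1, 2, 3], 2)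

def Spec_max_group (a : List Int) (k : Int) (out : Int) : Prop := out = max_group_alt a k
instance (a : List Int) (k : Int) (out : Int) : Decidable (Spec_max_group a k out) := by unfold Spec_max_group; infer_instance

-- ===== CLAIM (what is proved, stated in full; the proofs are below) =====
def Claim_equal_max_group : Prop := ∀ (a : List Int) (k : Int), Dom_max_group a k → Pre_max_group a k → Spec_max_group a k (max_group a k)

-- ===== LEMMAS AND PROOFS =====

-- the fold's running sum is the list sum
theorem foldl_prefix_fst (l : List Int) (s0 : Int) (acc : List Int) :
    (l.foldl (fun (p : Int × List Int) x => (p.1 + x, p.2 ++ [p.1 + x])) (s0, acc)).1 = s0 + l.sum := by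
  induction l generalizing s0 acc with
  | nil => simp
  | cons x t ih => simp [List.foldl_cons, ih]; ring

-- the fold's second component is the prefix-sum table
theorem foldl_prefix_snd (l : List Int) (s0 : Int) (acc : List Int) :
    (l.foldl (fun (p : Int × List Int) x => (p.1 + x, p.2 ++ [p.1 + x])) (s0, acc)).2
      = acc ++ (List.range l.length).map (fun i => s0 + ((l.take (i + 1)).sum)) := by
  induction l generalizing s0 acc with
  | nil => simp
  | cons x t ih =>
    simp only [List.foldl_cons, ih, List.length_cons, List.range_succ_eq_map, List.map_cons,
      List.map_map]
    simp [List.append_assoc]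
    intro i _
    ring

-- table lookup = sum of the first pos elements
theorem prefix_getD (l : List Int) (pos : Nat) (hpos : pos ≤ l.length) :
    (([0] ++ (List.range l.length).map (fun i => 0 + ((l.take (i + 1)).sum))).getD pos 0)
      = (l.take pos).sum := by
  cases pos with
  | zero => simp
  | succ j =>
    have hj : j < l.length := by omega
    simp [List.getD, hj]

-- the probe value A computes from the prefix table and bisect equals B's direct min-sum
theorem probe_eq (sa : List Int) (hs : sa.Pairwise (· ≤ ·)) (v : Int) :
    (sa.take (PySem.List.bisectLeft sa v)).sum + v * ((sa.length : Int) - (PySem.List.bisectLeft sa v : Int))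
      = reachSum sa v := by
  obtain ⟨hle, hlt, hge⟩ := PySem.List.bisectLeft_spec sa v hs
  set pos := PySem.List.bisectLeft sa v with hposdef
  have hsplit : sa = sa.take pos ++ sa.drop pos := (List.take_append_drop pos sa).symm
  have h1 : (sa.take pos).map (fun x => if x < v then x else v) = sa.take pos := by
    conv_rhs => rw [← List.map_id (sa.take pos)]
    apply List.map_congr_left
    intro x hx
    obtain ⟨i, hi, hix⟩ := List.mem_iff_getElem.mp hx
    have hilen : i < sa.length := by
      have := hi; simp [List.length_take] at this; omega
    have hipos : i < pos := by
      have := hi; simp [List.length_take] at this; omega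
    have : sa[i] < v := hlt i hilen hipos
    rw [List.getElem_take] at hix
    simp [← hix, this, id]
  have h2 : (sa.drop pos).map (fun x => if x < v then x else v)
      = List.replicate (sa.length - pos) v := by
    rw [List.eq_replicate_iff]
    constructor
    · simp
    · intro b hb
      obtain ⟨x, hx, hxb⟩ := List.mem_map.mp hb
      obtain ⟨i, hi, hix⟩ := List.mem_iff_getElem.mp hx
      have hilen : pos + i < sa.length := by
        have := hi; simp [List.length_drop] at this; omega
      have hxge : v ≤ sa[pos + i] := hge (pos + i) hilen (by omega)
      rw [List.getElem_drop] at hix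
      have : ¬ x < v := by rw [← hix]; omega
      simp [← hxb, this]
  have hr : reachSum sa v = (sa.take pos).sum + (sa.length - pos) • v := by
    unfold reachSum
    conv_lhs => rw [hsplit]
    rw [List.map_append, List.sum_append, h1, h2, List.sum_replicate]
  rw [hr, nsmul_eq_mul]
  have hposle : pos ≤ sa.length := hle
  push_cast [Nat.cast_sub hposle]
  ring

-- A's midpoint over (lo, lo+w) is lo plus B's step d = (w+1)/2
theorem mid_eq_lo_add (lo : Int) (w : Nat) :
    PySem.Int.floordiv (lo + (lo + (w : Int)) + 1) 2 = lo + (((w + 1) / 2 : Nat) : Int) := by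
  rw [PySem.Int.floordiv_eq_ediv_of_pos (by omega)]
  omega

-- A's (lo, hi)-halving equals B's (lo, width)-halving once the probes agree
theorem loop_eq (sa pfx : List Int) (hs : sa.Pairwise (· ≤ ·))
    (hpfx : pfx = [0] ++ (List.range sa.length).map (fun i => 0 + ((sa.take (i + 1)).sum)))
    (k : Int) : ∀ (w : Nat) (lo : Int),
    maxGroupLoopA sa pfx sa.length k lo (lo + (w : Int)) = maxGroupGo sa k lo w := by
  intro w
  induction w using Nat.strong_induction_on with
  | _ w ih =>
    intro lo
    match w with
    | 0 => rw [maxGroupLoopA]; simp [maxGroupGo]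
    | Nat.succ w' =>
      rw [maxGroupLoopA, maxGroupGo]
      have hlt : lo < lo + ((w' + 1 : Nat) : Int) := by push_cast; omega
      simp only [hlt, dif_pos]
      have hmid : PySem.Int.floordiv (lo + (lo + ((w' + 1 : Nat) : Int)) + 1) 2
          = lo + (((w' + 2) / 2 : Nat) : Int) := by
        have := mid_eq_lo_add lo (w' + 1)
        push_cast at this ⊢
        convert this using 3
      set d := (w' + 2) / 2 with hd
      have hd1 : 1 ≤ d := by omega
      have hdw : d ≤ w' + 1 := by omega
      rw [hmid]
      set v := lo + (d : Int) with hv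
      have hposle : PySem.List.bisectLeft sa v ≤ sa.length :=
        (PySem.List.bisectLeft_spec sa v hs).1
      have htot : pfx.getD (PySem.List.bisectLeft sa v) 0
          + v * ((sa.length : Int) - (PySem.List.bisectLeft sa v : Int)) = reachSum sa v := by
        rw [hpfx, prefix_getD sa _ hposle, probe_eq sa hs v]
      rw [htot]
      by_cases hp : reachSum sa v ≥ v * k
      · simp only [hp, if_pos]
        have harg : lo + ((w' + 1 : Nat) : Int) = v + ((w' + 1 - d : Nat) : Int) := by
          rw [hv]; push_cast [Nat.cast_sub hdw]; ring
        rw [harg]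
        exact ih (w' + 1 - d) (by omega) v
      · simp only [hp, if_neg, not_false_iff]
        have harg : v - 1 = lo + ((d - 1 : Nat) : Int) := by
          rw [hv]; push_cast [Nat.cast_sub hd1]; ring
        rw [harg]
        exact ih (d - 1) (by omega) lo

-- ===== VERDICT (by name: the statement is the Claim_ definition above) =====
theorem max_group_spec : Claim_equal_max_group := by
  intro a k _ _
  unfold Spec_max_group max_group max_group_alt
  set sa := PySem.List.sorted a (fun x => x) with hsa
  have hs : sa.Pairwise (· ≤ ·) := PySem.List.sorted_pairwise a (fun x => x)
  have hfst := foldl_prefix_fst sa 0 [0]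
  have hsnd := foldl_prefix_snd sa 0 [0]
  simp only [hfst, hsnd, zero_add]
  set cap := PySem.Int.floordiv sa.sum k with hcap
  by_cases h : 0 < cap
  · rw [if_pos h]
    conv_lhs => rw [show cap = 0 + ((cap.toNat : Nat) : Int) from by omega]
    refine loop_eq sa _ hs ?_ k cap.toNat 0
    simp
  · rw [if_neg h, maxGroupLoopA]
    simp [maxGroupGo, h]
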